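-- pv_equiv track=rewrite | github.com/polaris64/advent-of-code | 2022/10/solve.py | simulate_crt
-- ===== SOURCE A (Python) =====
-- def simulate(inp):
--     ctx = {
--         "x": 1,
--         "cycle": 1,
--     }
--     yield ctx
--     for instr in inp:
--         if instr[0] == "addx":
--             ctx["cycle"] += 1
--             yield ctx
--             ctx["x"] += instr[1]
--             ctx["cycle"] += 1
--             yield ctx
--         elif instr[0] == "noop":
--             ctx["cycle"] += 1
--             yield ctx
--     return ctx
--
-- def simulate_crt(inp):
--     fb = [[" " for x in range(40)] for y in range(6)]
--
--     for ctx in simulate(inp):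
--         cycle = ctx["cycle"] - 1
--         if cycle >= 40 * 6:
--             break
--         xp = cycle % 40
--         yp = cycle // 40
--         if xp in range(ctx["x"] - 1, ctx["x"] + 2):
--             fb[yp][xp] = "#"
--         else:
--             fb[yp][xp] = "."
--
--     return fb
-- ===== SOURCE B (Python) =====
-- def simulate_crt(inp):
--     # Run-length encode the register over cycles into constant-value segments,
--     # then paint: start from a '.'-filled strip and, per segment, '#'-fill the
--     # intersection of the segment with each crossed row's lit column window
--     # using interval arithmetic -- no per-cycle register lookup or sprite test.
--     segs = []
--     s, x, c = 0, 1, 1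
--     for op, v in inp:
--         if op == "addx":
--             segs.append((s, c + 1, x))
--             x += v
--             s, c = c + 1, c + 2
--         elif op == "noop":
--             c += 1
--     segs.append((s, c, x))
--     n = min(240, c)
--     flat = ['.'] * n + [' '] * (240 - n)
--     for s, e, xv in segs:
--         e = min(e, 240)
--         for r in range(s // 40, (e + 39) // 40):
--             lo = max(s, 40 * r + max(xv - 1, 0))
--             hi = min(e, 40 * r + min(xv + 2, 40))
--             for i in range(lo, hi):
--                 flat[i] = '#'
--     return [flat[r * 40:(r + 1) * 40] for r in range(6)]
-- ===== Notes on version B (the rewrite author's own statement) =====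
-- stated objective: alternative
-- what changed: Replaces A's per-cycle generator/consumer simulation (one sprite test and one pixel write per cycle) by run-length encoding the register into constant-value segments and painting a '.'-prefilled strip per segment via interval intersection of the segment with each crossed row's lit column window.
import Mathlib
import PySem

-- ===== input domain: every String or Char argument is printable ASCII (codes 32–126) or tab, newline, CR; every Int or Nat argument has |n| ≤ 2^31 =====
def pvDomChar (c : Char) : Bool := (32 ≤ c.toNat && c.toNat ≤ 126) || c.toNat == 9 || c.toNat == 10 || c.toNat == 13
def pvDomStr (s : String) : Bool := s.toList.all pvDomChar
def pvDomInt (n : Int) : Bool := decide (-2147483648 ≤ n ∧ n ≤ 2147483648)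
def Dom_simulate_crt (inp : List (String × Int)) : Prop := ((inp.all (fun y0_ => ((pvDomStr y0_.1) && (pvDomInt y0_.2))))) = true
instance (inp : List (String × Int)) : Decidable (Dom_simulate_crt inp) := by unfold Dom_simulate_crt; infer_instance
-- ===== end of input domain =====

-- B replaces A's per-cycle generator/consumer simulation by run-length encoding the
-- register into constant-value segments and painting a '.'-prefilled strip per segment
-- via interval intersection with each crossed row's lit column window; objective:
-- alternative algorithm, similar cost.

-- ===== PORT A =====
-- the (x, cycle) states yielded by A's generator `simulate` after the initial one
def pvSimStates : List (String × Int) → Int → Int → List (Int × Int)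
  | [], _, _ => []
  | (op, v) :: rest, x, c =>
    if op == "addx" then (x, c + 1) :: (x + v, c + 2) :: pvSimStates rest (x + v) (c + 2)
    else if op == "noop" then (x, c + 1) :: pvSimStates rest x (c + 1)
    else pvSimStates rest x c

-- fb[yp][xp] = s ; at every call site yp and xp are nonnegative and in range,
-- so functional update with Nat indices is exact
def pvSet2d (fb : List (List String)) (yp xp : Nat) (s : String) : List (List String) :=
  fb.modify yp (fun row => row.set xp s)

-- A's `for ctx in simulate(inp)` loop with the `break`
def pvRenderLoop : List (Int × Int) → List (List String) → List (List String)
  | [], fb => fb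
  | (x, c) :: rest, fb =>
    let cycle := c - 1
    if 40 * 6 ≤ cycle then fb
    else
      let xp := PySem.Int.mod cycle 40
      let yp := PySem.Int.floordiv cycle 40
      -- `xp in range(x - 1, x + 2)`  ↔  x - 1 ≤ xp < x + 2
      let px := if x - 1 ≤ xp ∧ xp < x + 2 then "#" else "."
      pvRenderLoop rest (pvSet2d fb yp.toNat xp.toNat px)

def simulate_crt (inp : List (String × Int)) : List (List String) :=
  let fb := List.replicate 6 (List.replicate 40 " ")
  pvRenderLoop ((1, 1) :: pvSimStates inp 1 1) fb

-- ===== PORT B =====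
-- Source B's first loop: run-length segments (start, end, x) of constant register value,
-- together with the final cycle count c
def pvSegsAll : List (String × Int) → Int → Int → Int → List (Int × Int × Int) × Int
  | [], s, x, c => ([(s, c, x)], c)
  | (op, v) :: rest, s, x, c =>
    if op == "addx" then
      let r := pvSegsAll rest (c + 1) (x + v) (c + 2)
      ((s, c + 1, x) :: r.1, r.2)
    else if op == "noop" then pvSegsAll rest s x (c + 1)
    else pvSegsAll rest s x c

-- Source B's inner painting of one segment; every painted index i satisfies 0 ≤ i < 240,
-- so `flat[i] = '#'` is exactly `List.set i.toNat`
def pvPaintSeg (fl : List String) (s e xv : Int) : List String :=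
  (PySem.List.pyRange (PySem.Int.floordiv s 40) (PySem.Int.floordiv (min e 240 + 39) 40) 1).foldl
    (fun fl1 r =>
      (PySem.List.pyRange (max s (40 * r + max (xv - 1) 0))
          (min (min e 240) (40 * r + min (xv + 2) 40)) 1).foldl
        (fun fl2 i => fl2.set i.toNat "#") fl1) fl

def simulate_crt_alt (inp : List (String × Int)) : List (List String) :=
  let sc := pvSegsAll inp 0 1 1
  let n := min 240 sc.2
  let flat := List.replicate n.toNat "." ++ List.replicate (240 - n).toNat " "
  let flat' := sc.1.foldl (fun fl t => pvPaintSeg fl t.1 t.2.1 t.2.2) flat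
  (List.range 6).map fun r => (flat'.drop (r * 40)).take 40

-- ===== PRECONDITION & SPEC =====
def Spec_simulate_crt (inp : List (String × Int)) (out : List (List String)) : Prop := out = simulate_crt_alt inp
instance (inp : List (String × Int)) (out : List (List String)) : Decidable (Spec_simulate_crt inp out) := by unfold Spec_simulate_crt; infer_instance

-- ===== CLAIM (what is proved, stated in full; the proofs are below) =====
def Claim_equal_simulate_crt : Prop := ∀ (inp : List (String × Int)), Dom_simulate_crt inp → Spec_simulate_crt inp (simulate_crt inp)

-- ===== LEMMAS AND PROOFS =====

-- ---- A-side: the yielded states are the register trace paired with cycle numbers ----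
def pvTrace : List (String × Int) → Int → List Int
  | [], _ => []
  | (op, v) :: rest, x =>
    if op == "addx" then x :: (x + v) :: pvTrace rest (x + v)
    else if op == "noop" then x :: pvTrace rest x
    else pvTrace rest x

def pvPair : List Int → Int → List (Int × Int)
  | [], _ => []
  | v :: rest, c => (v, c) :: pvPair rest (c + 1)

theorem pvSimStates_eq_pair (inp : List (String × Int)) (x c : Int) :
    pvSimStates inp x c = pvPair (pvTrace inp x) (c + 1) := by
  induction inp generalizing x c with
  | nil => rfl
  | cons hd rest ih =>
    obtain ⟨op, v⟩ := hd
    by_cases h1 : op == "addx"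
    · simp [pvSimStates, pvTrace, h1, pvPair, ih]
      ring_nf
      exact ⟨trivial, trivial⟩
    · by_cases h2 : op == "noop"
      · simp [pvSimStates, pvTrace, h1, h2, pvPair, ih]
      · simp [pvSimStates, pvTrace, h1, h2, ih]

-- the pixel A writes for register value v at (0-based) cycle k
def pvPix (v : Int) (k : Nat) : String :=
  if v - 1 ≤ ((k % 40 : Nat) : Int) ∧ ((k % 40 : Nat) : Int) < v + 2 then "#" else "."

theorem pvSet2d_getD (fb : List (List String)) (yp xp : Nat) (s : String) (y p : Nat) :
    ((pvSet2d fb yp xp s).getD y []).getD p "" =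
      if y = yp ∧ p = xp ∧ y < fb.length ∧ p < (fb.getD y []).length then s
      else (fb.getD y []).getD p "" := by
  unfold pvSet2d
  simp only [List.getD_eq_getElem?_getD, List.getElem?_modify]
  rcases Nat.lt_or_ge y fb.length with hy | hy
  · rw [List.getElem?_eq_getElem hy]
    by_cases hyy : y = yp
    · subst hyy
      simp only [Option.getD_some]
      by_cases hpp : p = xp
      · subst hpp
        by_cases hlt : p < fb[y].length
        · simp [hlt, hy]
        · have h1 : fb[y][p]? = none := List.getElem?_eq_none (Nat.le_of_not_lt hlt)
          simp [List.getElem?_set, hlt, hy, h1]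
      · simp [hpp, Ne.symm hpp]
    · have : yp ≠ y := Ne.symm hyy
      simp [hyy, this]
  · rw [List.getElem?_eq_none hy]
    simp [Nat.not_lt.mpr hy]

-- cellwise description of A's render loop over a sequentially-numbered trace
theorem pvRenderLoop_cell (xs : List Int) (k : Nat) (fb : List (List String))
    (hlen : fb.length = 6) (hrow : ∀ y, (fb.getD y []).length = if y < 6 then 40 else 0) :
    ∀ y p : Nat, y < 6 → p < 40 →
      (((pvRenderLoop (pvPair xs ((k : Int) + 1)) fb).getD y []).getD p "" =
        if k ≤ 40 * y + p ∧ 40 * y + p < min 240 (k + xs.length)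
        then pvPix (xs.getD (40 * y + p - k) 0) (40 * y + p)
        else (fb.getD y []).getD p "") := by
  induction xs generalizing k fb with
  | nil =>
    intro y p hy hp
    simp only [pvPair, pvRenderLoop, List.length_nil]
    rw [if_neg (by omega)]
  | cons v rest ih =>
    intro y p hy hp
    simp only [pvPair, pvRenderLoop, List.length_cons]
    have hc : (k : Int) + 1 - 1 = (k : Int) := by ring
    have h406 : ((40 : Int) * 6) = 240 := by norm_num
    rw [hc, h406]
    by_cases hk : (240 : Int) ≤ (k : Int)
    · have hk' : 240 ≤ k := by exact_mod_cast hk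
      rw [if_pos hk, if_neg (by omega)]
    · have hk' : k < 240 := by omega
      rw [if_neg hk]
      have hmod : PySem.Int.mod (k : Int) 40 = ((k % 40 : Nat) : Int) :=
        PySem.Int.mod_natCast k 40
      have hdiv : PySem.Int.floordiv (k : Int) 40 = ((k / 40 : Nat) : Int) :=
        PySem.Int.floordiv_natCast k 40
      simp only [hmod, hdiv, Int.toNat_natCast]
      set fb' := pvSet2d fb (k / 40) (k % 40)
        (if v - 1 ≤ ((k % 40 : Nat) : Int) ∧ ((k % 40 : Nat) : Int) < v + 2 then "#" else ".")
        with hfb'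
      have hlen' : fb'.length = 6 := by simp [hfb', pvSet2d, hlen]
      have hrow' : ∀ y, (fb'.getD y []).length = if y < 6 then 40 else 0 := by
        intro y'
        rw [hfb', pvSet2d, List.getD_eq_getElem?_getD, List.getElem?_modify]
        rcases Nat.lt_or_ge y' fb.length with h | h
        · rw [List.getElem?_eq_getElem h]
          have hr := hrow y'
          rw [List.getD_eq_getElem _ _ h] at hr
          by_cases hyy : k / 40 = y' <;> simp [hyy, hr]
        · rw [List.getElem?_eq_none h]
          have hr := hrow y'
          rw [List.getD_eq_default _ _ h] at hr
          simpa using hr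
      have hcast : ((k : Int) + 1 + 1) = (((k + 1 : Nat) : Int) + 1) := by push_cast; ring
      rw [hcast, ih (k + 1) fb' hlen' hrow' y p hy hp]
      have hcell := pvSet2d_getD fb (k / 40) (k % 40)
        (if v - 1 ≤ ((k % 40 : Nat) : Int) ∧ ((k % 40 : Nat) : Int) < v + 2 then "#" else ".") y p
      rw [← hfb'] at hcell
      have hrowy : (fb.getD y []).length = 40 := by rw [hrow y]; simp [hy]
      by_cases hhit : k ≤ 40 * y + p ∧ 40 * y + p < min 240 (k + (rest.length + 1))
      · rw [if_pos hhit]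
        by_cases heq : 40 * y + p = k
        · have hylo : y = k / 40 ∧ p = k % 40 := by omega
          rw [if_neg (by omega), hcell,
            if_pos ⟨hylo.1, hylo.2, by omega, by rw [hrowy]; omega⟩]
          have h0 : 40 * y + p - k = 0 := by omega
          rw [h0]
          simp only [List.getD_cons_zero, pvPix, heq]
        · rw [if_pos (by omega)]
          have hidx : 40 * y + p - k = (40 * y + p - (k + 1)) + 1 := by omega
          rw [hidx, List.getD_cons_succ]
      · rw [if_neg hhit, if_neg (by omega), hcell,
          if_neg (by rintro ⟨h1, h2, -, -⟩; omega)]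

-- pvRenderLoop preserves the 6×40 shape
theorem pvRenderLoop_len (states : List (Int × Int)) (fb : List (List String)) :
    (pvRenderLoop states fb).length = fb.length := by
  induction states generalizing fb with
  | nil => rfl
  | cons hd rest ih =>
    obtain ⟨x, c⟩ := hd
    simp only [pvRenderLoop]
    split
    · rfl
    · rw [ih]; simp [pvSet2d]

theorem pvRenderLoop_row_len (states : List (Int × Int)) (fb : List (List String)) (y : Nat) :
    ((pvRenderLoop states fb).getD y []).length = (fb.getD y []).length := by
  induction states generalizing fb with
  | nil => rfl
  | cons hd rest ih =>
    obtain ⟨x, c⟩ := hd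
    simp only [pvRenderLoop]
    split
    · rfl
    · rw [ih]
      simp only [pvSet2d, List.getD_eq_getElem?_getD, List.getElem?_modify]
      rcases Nat.lt_or_ge y fb.length with h | h
      · rw [List.getElem?_eq_getElem h]
        split <;> simp
      · rw [List.getElem?_eq_none h]
        rfl

-- ---- B-side lemmas ----

-- total cycle count produced by the segment builder
theorem pvSegsAll_snd (inp : List (String × Int)) :
    ∀ (s x c : Int), (pvSegsAll inp s x c).2 = c + ((pvTrace inp x).length : Int) := by
  induction inp with
  | nil => intro s x c; simp [pvSegsAll, pvTrace]
  | cons hd rest ih =>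
    intro s x c
    obtain ⟨op, v⟩ := hd
    by_cases h1 : op == "addx"
    · simp only [pvSegsAll, pvTrace, h1, if_pos]
      rw [ih]
      simp
      ring
    · by_cases h2 : op == "noop"
      · simp only [pvSegsAll, pvTrace, h1, h2, if_pos]
        simp only [Bool.not_eq_true] at h1
        simp [ih]
        ring
      · simp only [pvSegsAll, pvTrace]
        simp only [Bool.not_eq_true] at h1 h2
        simp [h1, h2, ih]

-- every segment start is nonnegative
theorem pvSegsAll_pos (inp : List (String × Int)) :
    ∀ (s x c : Int), 0 ≤ s → s ≤ c →
      ∀ t ∈ (pvSegsAll inp s x c).1, 0 ≤ t.1 := by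
  induction inp with
  | nil =>
    intro s x c h0 hsc t ht
    simp [pvSegsAll] at ht
    subst ht; exact h0
  | cons hd rest ih =>
    intro s x c h0 hsc t ht
    obtain ⟨op, v⟩ := hd
    by_cases h1 : op == "addx"
    · simp only [pvSegsAll, h1, if_pos, List.mem_cons] at ht
      rcases ht with rfl | ht
      · exact h0
      · exact ih (c + 1) (x + v) (c + 2) (by omega) (by omega) t ht
    · by_cases h2 : op == "noop"
      · have hts : pvSegsAll ((op, v) :: rest) s x c = pvSegsAll rest s x (c + 1) := by
          simp [pvSegsAll, h1, h2]
        rw [hts] at ht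
        exact ih s x (c + 1) h0 (by omega) t ht
      · have hts : pvSegsAll ((op, v) :: rest) s x c = pvSegsAll rest s x c := by
          simp [pvSegsAll, h1, h2]
        rw [hts] at ht
        exact ih s x c h0 hsc t ht

-- a cycle j is lit by some segment iff j is a real cycle and the trace value at j lights it
theorem pvSegsAll_cover (inp : List (String × Int)) (P : Int → Prop) :
    ∀ (s x c : Int), s ≤ c → ∀ j : Int,
      ((∃ t ∈ (pvSegsAll inp s x c).1, t.1 ≤ j ∧ j < t.2.1 ∧ P t.2.2) ↔
        (s ≤ j ∧ j < (pvSegsAll inp s x c).2 ∧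
          P (if j < c then x else (pvTrace inp x).getD (j - c).toNat 0))) := by
  induction inp with
  | nil =>
    intro s x c hsc j
    simp only [pvSegsAll, pvTrace, List.mem_singleton]
    constructor
    · rintro ⟨t, rfl, h1, h2, h3⟩
      exact ⟨h1, h2, by rw [if_pos (by omega)]; simpa using h3⟩
    · rintro ⟨h1, h2, h3⟩
      exact ⟨(s, c, x), rfl, h1, h2, by rw [if_pos h2] at h3; simpa using h3⟩
  | cons hd rest ih =>
    intro s x c hsc j
    obtain ⟨op, v⟩ := hd
    by_cases h1 : op == "addx"
    · have hN : c + 2 ≤ (pvSegsAll rest (c + 1) (x + v) (c + 2)).2 := by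
        rw [pvSegsAll_snd]; omega
      have ihh := ih (c + 1) (x + v) (c + 2) (by omega) j
      simp only [pvSegsAll, pvTrace, h1, if_pos, List.mem_cons]
      constructor
      · rintro ⟨t, ht, hle, hlt, hP⟩
        rcases ht with rfl | ht
        · simp only at hle hlt hP
          refine ⟨hle, by omega, ?_⟩
          by_cases hjc : j < c
          · rw [if_pos hjc]; exact hP
          · have hj0 : (j - c).toNat = 0 := by omega
            rw [if_neg hjc, hj0, List.getD_cons_zero]; exact hP
        · obtain ⟨hj1, hj2, hP'⟩ := ihh.mp ⟨t, ht, hle, hlt, hP⟩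
          refine ⟨by omega, hj2, ?_⟩
          rw [if_neg (by omega)]
          by_cases hjc2 : j < c + 2
          · have hj1' : (j - c).toNat = 1 := by omega
            rw [hj1', List.getD_cons_succ, List.getD_cons_zero]
            rw [if_pos hjc2] at hP'; exact hP'
          · have hjm : (j - c).toNat = (j - (c + 2)).toNat + 1 + 1 := by omega
            rw [hjm, List.getD_cons_succ, List.getD_cons_succ]
            rw [if_neg hjc2] at hP'; exact hP'
      · rintro ⟨hj1, hj2, hP⟩
        by_cases hjc1 : j < c + 1
        · refine ⟨(s, c + 1, x), Or.inl rfl, hj1, by simpa using hjc1, ?_⟩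
          simp only
          by_cases hjc : j < c
          · rw [if_pos hjc] at hP; exact hP
          · have hj0 : (j - c).toNat = 0 := by omega
            rw [if_neg hjc, hj0, List.getD_cons_zero] at hP; exact hP
        · have hP' : P (if j < c + 2 then x + v
              else (pvTrace rest (x + v)).getD (j - (c + 2)).toNat 0) := by
            rw [if_neg (by omega)] at hP
            by_cases hjc2 : j < c + 2
            · have hj1' : (j - c).toNat = 1 := by omega
              rw [hj1', List.getD_cons_succ, List.getD_cons_zero] at hP
              rw [if_pos hjc2]; exact hP
            · have hjm : (j - c).toNat = (j - (c + 2)).toNat + 1 + 1 := by omega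
              rw [hjm, List.getD_cons_succ, List.getD_cons_succ] at hP
              rw [if_neg hjc2]; exact hP
          obtain ⟨t, ht, hh⟩ := ihh.mpr ⟨by omega, hj2, hP'⟩
          exact ⟨t, Or.inr ht, hh⟩
    · by_cases h2 : op == "noop"
      · have ihh := ih s x (c + 1) (by omega) j
        simp only [Bool.not_eq_true] at h1
        simp only [pvSegsAll, pvTrace, h1, h2, Bool.false_eq_true, if_false, if_pos]
        rw [ihh]
        constructor
        · rintro ⟨hj1, hj2, hP⟩
          refine ⟨hj1, hj2, ?_⟩
          by_cases hjc : j < c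
          · rw [if_pos (by omega)] at hP
            rw [if_pos hjc]; exact hP
          · rw [if_neg hjc]
            by_cases hjc1 : j < c + 1
            · rw [if_pos hjc1] at hP
              have hj0 : (j - c).toNat = 0 := by omega
              rw [hj0, List.getD_cons_zero]; exact hP
            · rw [if_neg hjc1] at hP
              have hjm : (j - c).toNat = (j - (c + 1)).toNat + 1 := by omega
              rw [hjm, List.getD_cons_succ]; exact hP
        · rintro ⟨hj1, hj2, hP⟩
          refine ⟨hj1, hj2, ?_⟩
          by_cases hjc1 : j < c + 1
          · rw [if_pos hjc1]
            by_cases hjc : j < c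
            · rw [if_pos hjc] at hP; exact hP
            · rw [if_neg hjc] at hP
              have hj0 : (j - c).toNat = 0 := by omega
              rw [hj0, List.getD_cons_zero] at hP; exact hP
          · rw [if_neg hjc1]
            rw [if_neg (by omega)] at hP
            have hjm : (j - c).toNat = (j - (c + 1)).toNat + 1 := by omega
            rw [hjm, List.getD_cons_succ] at hP; exact hP
      · simp only [Bool.not_eq_true] at h1 h2
        simp only [pvSegsAll, pvTrace, h1, h2, Bool.false_eq_true, if_false]
        exact ih s x c hsc j

-- generic: a fold that preserves length preserves length
theorem pvFoldlLen {α : Type} (g : List String → α → List String)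
    (h : ∀ fl a, (g fl a).length = fl.length) :
    ∀ (L : List α) (fl : List String), (L.foldl g fl).length = fl.length := by
  intro L
  induction L with
  | nil => intro fl; rfl
  | cons hd rest ih => intro fl; rw [List.foldl_cons, ih, h]

-- functional update, pointwise
theorem pvSet_getD (fl : List String) (k j : Nat) (a : String) :
    (fl.set k a).getD j "" = if k = j ∧ j < fl.length then a else fl.getD j "" := by
  simp only [List.getD_eq_getElem?_getD, List.getElem?_set]
  by_cases hkj : k = j
  · subst hkj
    by_cases hl : k < fl.length
    · simp [hl]
    · rw [List.getElem?_eq_none (by omega)]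
      simp [hl]
  · simp [hkj]

-- the inner `for i in range(lo, hi): flat[i] = '#'` loop, pointwise
theorem pvSetFold_getD (hi : Int) (j : Nat) :
    ∀ (n : Nat) (lo : Int) (fl : List String), 0 ≤ lo → (hi - lo).toNat = n →
      ((PySem.List.pyRange lo hi 1).foldl (fun fl2 i => fl2.set i.toNat "#") fl).getD j "" =
        if lo ≤ (j : Int) ∧ (j : Int) < hi ∧ j < fl.length then "#" else fl.getD j "" := by
  intro n
  induction n with
  | zero =>
    intro lo fl h0 hn
    rw [PySem.List.pyRange_one_eq_nil (by omega)]
    rw [List.foldl_nil, if_neg (by omega)]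
  | succ n ihn =>
    intro lo fl h0 hn
    have hlt : lo < hi := by omega
    rw [PySem.List.pyRange_one_cons hlt, List.foldl_cons]
    rw [ihn (lo + 1) _ (by omega) (by omega), List.length_set, pvSet_getD]
    split_ifs <;> first | rfl | (exfalso; omega)
-- the row loop of pvPaintSeg, pointwise
theorem pvRowFold_getD (s e' xv : Int) (b : Int) (j : Nat) :
    ∀ (n : Nat) (a : Int) (fl : List String), 0 ≤ a → (b - a).toNat = n →
      ((PySem.List.pyRange a b 1).foldl
        (fun fl1 r =>
          (PySem.List.pyRange (max s (40 * r + max (xv - 1) 0))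
              (min e' (40 * r + min (xv + 2) 40)) 1).foldl
            (fun fl2 i => fl2.set i.toNat "#") fl1) fl).getD j "" =
      if a ≤ ((j / 40 : Nat) : Int) ∧ ((j / 40 : Nat) : Int) < b ∧
         max s (40 * ((j / 40 : Nat) : Int) + max (xv - 1) 0) ≤ (j : Int) ∧
         (j : Int) < min e' (40 * ((j / 40 : Nat) : Int) + min (xv + 2) 40) ∧ j < fl.length
      then "#" else fl.getD j "" := by
  intro n
  induction n with
  | zero =>
    intro a fl h0 hn
    rw [PySem.List.pyRange_one_eq_nil (by omega)]
    rw [List.foldl_nil, if_neg (by omega)]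
  | succ n ihn =>
    intro a fl h0 hn
    have hlt : a < b := by omega
    rw [PySem.List.pyRange_one_cons hlt, List.foldl_cons]
    have hinlen : ((PySem.List.pyRange (max s (40 * a + max (xv - 1) 0))
        (min e' (40 * a + min (xv + 2) 40)) 1).foldl
          (fun fl2 i => fl2.set i.toNat "#") fl).length = fl.length := by
      exact pvFoldlLen _ (by intro fl' i; simp) _ fl
    rw [ihn (a + 1) _ (by omega) (by omega)]
    rw [hinlen]
    rw [pvSetFold_getD _ j _ (max s (40 * a + max (xv - 1) 0)) fl (by omega) rfl]
    split_ifs <;> first | rfl | (exfalso; omega)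

-- pvPaintSeg, pointwise: paints '#' exactly on the segment's lit cycles
theorem pvPaintSeg_getD (fl : List String) (s e xv : Int) (h0 : 0 ≤ s) (j : Nat)
    (hlen : fl.length = 240) (hj : j < 240) :
    (pvPaintSeg fl s e xv).getD j "" =
      if s ≤ (j : Int) ∧ (j : Int) < e ∧ xv - 1 ≤ ((j % 40 : Nat) : Int) ∧
          ((j % 40 : Nat) : Int) < xv + 2
      then "#" else fl.getD j "" := by
  unfold pvPaintSeg
  have hdivs : PySem.Int.floordiv s 40 = s / 40 :=
    PySem.Int.floordiv_eq_ediv_of_pos (by norm_num)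
  have hdive : PySem.Int.floordiv (min e 240 + 39) 40 = (min e 240 + 39) / 40 :=
    PySem.Int.floordiv_eq_ediv_of_pos (by norm_num)
  rw [hdivs, hdive]
  rw [pvRowFold_getD (s := s) (e' := min e 240) (xv := xv) (b := (min e 240 + 39) / 40)
    (j := j) _ (s / 40) fl (by omega) rfl]
  rw [hlen]
  split_ifs <;> first | rfl | (exfalso; omega)

-- the fold over all segments, pointwise
theorem pvSegFold_getD (segs : List (Int × Int × Int)) :
    ∀ (fl : List String) (j : Nat), fl.length = 240 → j < 240 →
      (∀ t ∈ segs, 0 ≤ t.1) →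
      ((segs.foldl (fun fl t => pvPaintSeg fl t.1 t.2.1 t.2.2) fl).getD j "" =
        if ∃ t ∈ segs, t.1 ≤ (j : Int) ∧ (j : Int) < t.2.1 ∧
            t.2.2 - 1 ≤ ((j % 40 : Nat) : Int) ∧ ((j % 40 : Nat) : Int) < t.2.2 + 2
        then "#" else fl.getD j "") := by
  induction segs with
  | nil =>
    intro fl j hlen hj hpos
    simp
  | cons t rest ih =>
    intro fl j hlen hj hpos
    rw [List.foldl_cons]
    have hlen' : (pvPaintSeg fl t.1 t.2.1 t.2.2).length = 240 := by
      unfold pvPaintSeg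
      rw [pvFoldlLen _ (by
        intro fl' r
        exact pvFoldlLen _ (by intro fl'' i; simp) _ fl')]
      exact hlen
    rw [ih _ j hlen' hj (fun t' ht' => hpos t' (List.mem_cons_of_mem _ ht'))]
    rw [pvPaintSeg_getD fl t.1 t.2.1 t.2.2 (hpos t List.mem_cons_self) j hlen hj]
    by_cases hrest : ∃ t' ∈ rest, t'.1 ≤ (j : Int) ∧ (j : Int) < t'.2.1 ∧
        t'.2.2 - 1 ≤ ((j % 40 : Nat) : Int) ∧ ((j % 40 : Nat) : Int) < t'.2.2 + 2
    · rw [if_pos hrest, if_pos]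
      obtain ⟨t', ht', hh⟩ := hrest
      exact ⟨t', List.mem_cons_of_mem _ ht', hh⟩
    · rw [if_neg hrest]
      by_cases hthis : t.1 ≤ (j : Int) ∧ (j : Int) < t.2.1 ∧
          t.2.2 - 1 ≤ ((j % 40 : Nat) : Int) ∧ ((j % 40 : Nat) : Int) < t.2.2 + 2
      · rw [if_pos hthis, if_pos ⟨t, List.mem_cons_self, hthis⟩]
      · rw [if_neg hthis, if_neg (by
          rintro ⟨t', ht', hh⟩
          rcases List.mem_cons.mp ht' with rfl | ht''
          · exact hthis hh
          · exact hrest ⟨t', ht'', hh⟩)]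

-- the initial strip: '.' for real cycles, ' ' beyond
theorem pvInit_getD (n : Int) (hn1 : 0 ≤ n) (hn2 : n ≤ 240) (j : Nat) (hj : j < 240) :
    (List.replicate n.toNat "." ++ List.replicate (240 - n).toNat " ").getD j "" =
      if (j : Int) < n then "." else " " := by
  simp only [List.getD_eq_getElem?_getD, List.getElem?_append, List.length_replicate,
    List.getElem?_replicate]
  split_ifs <;> first | rfl | (exfalso; omega)

theorem pvInit_len (n : Int) (hn1 : 0 ≤ n) (hn2 : n ≤ 240) :
    (List.replicate n.toNat "." ++ List.replicate (240 - n).toNat " ").length = 240 := by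
  simp only [List.length_append, List.length_replicate]
  omega

theorem pvPaintSeg_len (fl : List String) (s e xv : Int) :
    (pvPaintSeg fl s e xv).length = fl.length := by
  unfold pvPaintSeg
  exact pvFoldlLen _ (fun fl' r => pvFoldlLen _ (fun fl'' i => by simp) _ fl') _ fl

theorem pvSegFold_len (segs : List (Int × Int × Int)) (fl : List String) :
    (segs.foldl (fun fl t => pvPaintSeg fl t.1 t.2.1 t.2.2) fl).length = fl.length := by
  induction segs generalizing fl with
  | nil => rfl
  | cons t rest ih => rw [List.foldl_cons, ih, pvPaintSeg_len]

-- B's port, written out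
theorem simulate_crt_alt_eq (inp : List (String × Int)) :
    simulate_crt_alt inp = (List.range 6).map (fun r =>
      (((pvSegsAll inp 0 1 1).1.foldl (fun fl t => pvPaintSeg fl t.1 t.2.1 t.2.2)
        (List.replicate (min 240 (pvSegsAll inp 0 1 1).2).toNat "." ++
          List.replicate (240 - min 240 (pvSegsAll inp 0 1 1).2).toNat " ")).drop
            (r * 40)).take 40) := rfl

theorem pvAlt_len (inp : List (String × Int)) : (simulate_crt_alt inp).length = 6 := by
  rw [simulate_crt_alt_eq]; simp

theorem pvAlt_row_len (inp : List (String × Int)) (y : Nat) (hy : y < 6) :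
    ((simulate_crt_alt inp).getD y []).length = 40 := by
  have hN : (pvSegsAll inp 0 1 1).2 = 1 + ((pvTrace inp 1).length : Int) :=
    pvSegsAll_snd inp 0 1 1
  rw [simulate_crt_alt_eq]
  rw [List.getD_eq_getElem _ _ (by simpa using hy)]
  simp only [List.getElem_map, List.getElem_range, List.length_take, List.length_drop]
  rw [pvSegFold_len, pvInit_len _ (by omega) (by omega)]
  omega

theorem pvAlt_cell (inp : List (String × Int)) (y p : Nat) (hy : y < 6) (hp : p < 40) :
    ((simulate_crt_alt inp).getD y []).getD p "" =
      if 40 * y + p < min 240 (1 :: pvTrace inp 1).length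
      then pvPix ((1 :: pvTrace inp 1).getD (40 * y + p) 0) (40 * y + p)
      else " " := by
  have hN : (pvSegsAll inp 0 1 1).2 = 1 + ((pvTrace inp 1).length : Int) :=
    pvSegsAll_snd inp 0 1 1
  rw [simulate_crt_alt_eq]
  set sc := pvSegsAll inp 0 1 1 with hsc
  set flat := List.replicate (min 240 sc.2).toNat "." ++
      List.replicate (240 - min 240 sc.2).toNat " " with hflat
  set flat' := sc.1.foldl (fun fl t => pvPaintSeg fl t.1 t.2.1 t.2.2) flat with hflat'
  have hflatlen0 : flat.length = 240 := by
    rw [hflat]; exact pvInit_len _ (by omega) (by omega)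
  have hflen : flat'.length = 240 := by rw [hflat', pvSegFold_len]; exact hflatlen0
  have houter : ((List.range 6).map fun r => (flat'.drop (r * 40)).take 40).getD y [] =
      (flat'.drop (y * 40)).take 40 := by
    rw [List.getD_eq_getElem _ _ (by simpa using hy)]
    simp
  rw [houter]
  have hinlen : p < ((flat'.drop (y * 40)).take 40).length := by
    simp [hflen]; omega
  have hlt' : y * 40 + p < flat'.length := by rw [hflen]; omega
  have h1 : ((flat'.drop (y * 40)).take 40).getD p "" = flat'.getD (y * 40 + p) "" := by
    rw [List.getD_eq_getElem _ _ hinlen, List.getD_eq_getElem _ _ hlt',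
      List.getElem_take, List.getElem_drop]
  rw [h1, show y * 40 + p = 40 * y + p from by ring, hflat']
  rw [pvSegFold_getD sc.1 flat (40 * y + p) hflatlen0 (by omega)
    (pvSegsAll_pos inp 0 1 1 (by norm_num) (by norm_num))]
  have hcover := pvSegsAll_cover inp
    (fun v => v - 1 ≤ (((40 * y + p) % 40 : Nat) : Int) ∧
      (((40 * y + p) % 40 : Nat) : Int) < v + 2)
    0 1 1 (by norm_num) ((40 * y + p : Nat) : Int)
  simp only [] at hcover
  rw [← hsc] at hcover
  have hval : (if ((40 * y + p : Nat) : Int) < 1 then (1 : Int)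
      else (pvTrace inp 1).getD (((40 * y + p : Nat) : Int) - 1).toNat 0) =
        (1 :: pvTrace inp 1).getD (40 * y + p) 0 := by
    by_cases hj0 : 40 * y + p = 0
    · rw [hj0]; norm_num
    · obtain ⟨k, hk⟩ := Nat.exists_eq_succ_of_ne_zero hj0
      rw [hk, if_neg (by omega), List.getD_cons_succ]
      congr 1
      omega
  rw [hval] at hcover
  simp only [hcover]
  rw [hflat, pvInit_getD _ (by omega) (by omega) _ (by omega)]
  have hxsl : (1 :: pvTrace inp 1).length = (pvTrace inp 1).length + 1 := by simp
  unfold pvPix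
  split_ifs <;> first | rfl | (exfalso; omega)

-- ===== VERDICT (by name: the statement is the Claim_ definition above) =====
theorem simulate_crt_spec : Claim_equal_simulate_crt := by
  intro inp _
  unfold Spec_simulate_crt
  set xs : List Int := 1 :: pvTrace inp 1 with hxs
  set fb0 : List (List String) := List.replicate 6 (List.replicate 40 " ") with hfb0
  have hfb0len : fb0.length = 6 := by simp [hfb0]
  have hfb0row : ∀ y, (fb0.getD y []).length = if y < 6 then 40 else 0 := by
    intro y
    rcases Nat.lt_or_ge y 6 with h | h
    · rw [List.getD_eq_getElem _ _ (by simpa [hfb0] using h)]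
      simp only [hfb0, List.getElem_replicate, List.length_replicate]
      simp [h]
    · rw [List.getD_eq_default _ _ (by simpa [hfb0] using h)]
      simp [Nat.not_lt.mpr h]
  have hA : simulate_crt inp = pvRenderLoop (pvPair xs (((0 : Nat) : Int) + 1)) fb0 := by
    unfold simulate_crt
    rw [pvSimStates_eq_pair]
    simp [hxs, pvPair, hfb0]
  have hAlen : (simulate_crt inp).length = 6 := by
    rw [hA, pvRenderLoop_len, hfb0len]
  apply List.ext_getElem (by rw [hAlen, pvAlt_len])
  intro y hy1 hy2
  have hy : y < 6 := by omega
  have hArow : ((simulate_crt inp).getD y []).length = 40 := by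
    rw [hA, pvRenderLoop_row_len, hfb0row]; simp [hy]
  apply List.ext_getElem
  · rw [← List.getD_eq_getElem _ _ hy1, ← List.getD_eq_getElem _ _ hy2, hArow,
      pvAlt_row_len inp y hy]
  intro p hp1 hp2
  have hp : p < 40 := by
    rw [← List.getD_eq_getElem _ _ hy1, hArow] at hp1; exact hp1
  have hAcell := pvRenderLoop_cell xs 0 fb0 hfb0len hfb0row y p hy hp
  have hBcell := pvAlt_cell inp y p hy hp
  rw [← List.getD_eq_getElem, ← List.getD_eq_getElem, ← List.getD_eq_getElem,
    ← List.getD_eq_getElem, hA, hAcell, hBcell]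
  simp only [hxs]
  have hrowrep : fb0.getD y [] = List.replicate 40 " " := by
    rw [hfb0, List.getD_eq_getElem _ _ (by simpa using hy), List.getElem_replicate]
  have hfb0cell : (fb0.getD y []).getD p "" = " " := by
    rw [hrowrep, List.getD_eq_getElem _ _ (by simpa using hp), List.getElem_replicate]
  by_cases h : 40 * y + p < min 240 (1 :: pvTrace inp 1).length
  · rw [if_pos (by omega), if_pos h]
    simp
  · rw [if_neg (by omega), if_neg h, hfb0cell]
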